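-- pv_equiv track=rewrite | github.com/Jalle95/chat_bot | intent_lib.py | shortest_levenshtein
-- ===== SOURCE A (Python) =====
-- def indicator(a, b):
--     '''
--     indicator(a, b) returns 0 if a=b and 1 otherwise
--     '''
--     if a == b:
--         return 0
--     return 1
--
-- def levenshtein(a, b):
--     '''
--     levenshtein(a, b) computes the Levenshtein distance between the two
--     strings a and b. The Levenshtein distance is minimum number of edits
--     (insertions, deletions or substitutions) required to go from one string to
--     the other.
--     '''
--     # Naive implementation that scales super badly. With more time, a better
--     # implementation should be made, or a library could be used.
--     if min(len(a), len(b)) == 0: # If either a or b is empty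
--         return max(len(a), len(b)) # Make sufficient inserts
--     else:
--         return min([
--             levenshtein(a[1:], b) + 1, # Insertion b
--             levenshtein(a, b[1:]) + 1, # Insertion a
--             levenshtein(a[1:], b[1:]) + indicator(a[0], b[0]) # Swap if necessary
--             ])
--
-- def shortest_levenshtein(keyword, strings):
--     '''
--     shortest_levenshtein(keyword, strings) returns the string in the list strings
--     that has the shortest levenshtein distance to keyword and the corresponding
--     levenshtein distance.
--     '''
--     lev_dist = [levenshtein(keyword, s) for s in strings]
--     min_dist = max(lev_dist)
--     min_idx = 0
--     for i, d in enumerate(lev_dist):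
--         if d < min_dist:
--             min_idx = i
--             min_dist = d
--     return strings[min_idx], min_dist
-- ===== SOURCE B (Python) =====
-- def levenshtein(a, b):
--     # dynamic programming over suffixes: row[j] = distance(a_suffix, b[j:])
--     n = len(b)
--     row = [n - j for j in range(n + 1)]
--     for ca in reversed(a):
--         new = [row[n] + 1]
--         for j in range(n - 1, -1, -1):
--             new.append(min(row[j] + 1, new[-1] + 1, row[j + 1] + (ca != b[j])))
--         new.reverse()
--         row = new
--     return row[0]
--
-- def shortest_levenshtein(keyword, strings):
--     best_s = strings[0]
--     best_d = levenshtein(keyword, best_s)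
--     for s in strings[1:]:
--         d = levenshtein(keyword, s)
--         if d < best_d:
--             best_s, best_d = s, d
--     return best_s, best_d
-- ===== Notes on version B (the rewrite author's own statement) =====
-- stated objective: faster
-- what changed: Replaces the exponential three-way recursion for the Levenshtein distance by an iterative dynamic-programming row over suffixes, and replaces A's two-pass selection (distance list + max + scan loop) by a single pass keeping the best (string, distance) pair.
import Mathlib
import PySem

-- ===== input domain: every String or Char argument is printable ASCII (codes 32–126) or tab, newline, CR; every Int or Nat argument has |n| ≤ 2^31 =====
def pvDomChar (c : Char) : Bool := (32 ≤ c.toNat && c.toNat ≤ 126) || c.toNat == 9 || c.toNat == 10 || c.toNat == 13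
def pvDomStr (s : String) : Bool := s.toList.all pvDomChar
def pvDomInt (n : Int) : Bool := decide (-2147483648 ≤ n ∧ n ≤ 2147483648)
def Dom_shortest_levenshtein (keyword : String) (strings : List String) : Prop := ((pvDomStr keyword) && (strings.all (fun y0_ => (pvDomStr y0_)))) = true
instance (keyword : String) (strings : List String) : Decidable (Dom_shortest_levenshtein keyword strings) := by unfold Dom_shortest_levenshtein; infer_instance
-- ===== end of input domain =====

-- B replaces A's exponential recursive Levenshtein by a DP row over suffixes and A's
-- two-pass selection by a single best-pair pass (objective: faster, asymptotic).

-- ===== PORT A =====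
-- indicator(a, b)
def pvInd (a b : Char) : Int := if a = b then 0 else 1

-- levenshtein(a, b): naive three-way recursion, exactly A's branches
def pvLevA : List Char → List Char → Int
  | [], b => (b.length : Int)
  | _ :: a', [] => ((a'.length : Int) + 1)
  | x :: a', y :: b' =>
      min (pvLevA a' (y :: b') + 1)
        (min (pvLevA (x :: a') b' + 1)
          (pvLevA a' b' + pvInd x y))
termination_by a b => a.length + b.length
decreasing_by all_goals simp <;> omega

def shortest_levenshtein (keyword : String) (strings : List String) : String × Int :=
  let lev_dist := strings.map (fun s => pvLevA keyword.toList s.toList)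
  match PySem.List.max? lev_dist (fun d => d) with
  | none => ("", 0)  -- Python: max([]) raises ValueError; excluded by Pre_
  | some m =>
      let st := (PySem.List.enumerate lev_dist 0).foldl
        (fun (st : Int × Int) p => if p.2 < st.2 then (p.1, p.2) else st) (0, m)
      ((PySem.List.pyGet? strings st.1).getD "", st.2)

-- ===== PORT B =====
-- base row: distances of the empty a-suffix against each suffix of b
def pvBaseRow : List Char → List Int
  | [] => [0]
  | cb :: b' => ((cb :: b').length : Int) :: pvBaseRow b'

-- one DP step: from the row for a-suffix a', the row for ca :: a' (built right to left)
def pvNextRow (ca : Char) : List Char → List Int → List Int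
  | [], prev => [prev.headD 0 + 1]
  | _ :: _, [] => []  -- unreachable: the row is always one longer than b
  | cb :: b', p0 :: prest =>
      let rest := pvNextRow ca b' prest
      min (p0 + 1) (min (rest.headD 0 + 1) (prest.headD 0 + (if ca = cb then 0 else 1))) :: rest

-- levenshtein(a, b) by dynamic programming (Source B: iterate over reversed(a))
def pvLevB (a b : List Char) : Int :=
  (a.foldr (fun ca row => pvNextRow ca b row) (pvBaseRow b)).headD 0

def shortest_levenshtein_alt (keyword : String) (strings : List String) : String × Int :=
  match strings with
  | [] => ("", 0)  -- Python B: strings[0] raises IndexError; excluded by Pre_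
  | s0 :: rest =>
      rest.foldl
        (fun best s =>
          let d := pvLevB keyword.toList s.toList
          if d < best.2 then (s, d) else best)
        (s0, pvLevB keyword.toList s0.toList)

-- ===== PRECONDITION & SPEC =====
-- Pre_ excludes only the empty list, on which A raises ValueError (max of empty list).
def Pre_shortest_levenshtein (keyword : String) (strings : List String) : Prop := strings ≠ []
instance (keyword : String) (strings : List String) : Decidable (Pre_shortest_levenshtein keyword strings) := by unfold Pre_shortest_levenshtein; infer_instance
def pvWitness_shortest_levenshtein : String × List String := ("cat", ["bat", "hat", "dog"])

def Spec_shortest_levenshtein (keyword : String) (strings : List String) (out : String × Int) : Prop := out = shortest_levenshtein_alt keyword strings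
instance (keyword : String) (strings : List String) (out : String × Int) : Decidable (Spec_shortest_levenshtein keyword strings out) := by unfold Spec_shortest_levenshtein; infer_instance

-- ===== CLAIM (what is proved, stated in full; the proofs are below) =====
def Claim_equal_shortest_levenshtein : Prop := ∀ (keyword : String) (strings : List String), Dom_shortest_levenshtein keyword strings → Pre_shortest_levenshtein keyword strings → Spec_shortest_levenshtein keyword strings (shortest_levenshtein keyword strings)

-- ===== LEMMAS AND PROOFS =====

-- reference row: pvRowOf a b = [lev a b, lev a b.tail, …, lev a []]
def pvRowOf (a : List Char) : List Char → List Int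
  | [] => [pvLevA a []]
  | cb :: b' => pvLevA a (cb :: b') :: pvRowOf a b'

theorem pvRowOf_headD (a b : List Char) : (pvRowOf a b).headD 0 = pvLevA a b := by
  cases b <;> simp [pvRowOf]

theorem pvLevA_nil_right (a : List Char) : pvLevA a [] = (a.length : Int) := by
  cases a <;> simp [pvLevA]

theorem pvBaseRow_eq (b : List Char) : pvBaseRow b = pvRowOf [] b := by
  induction b with
  | nil => simp [pvBaseRow, pvRowOf, pvLevA]
  | cons cb b' ih => simp [pvBaseRow, pvRowOf, pvLevA, ih]

theorem pvNextRow_eq (ca : Char) (a' : List Char) :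
    ∀ b : List Char, pvNextRow ca b (pvRowOf a' b) = pvRowOf (ca :: a') b := by
  intro b
  induction b with
  | nil =>
      simp [pvRowOf, pvNextRow, pvLevA_nil_right]
  | cons cb b' ih =>
      simp only [pvRowOf, pvNextRow, ih, pvRowOf_headD]
      rw [show pvLevA (ca :: a') (cb :: b') =
        min (pvLevA a' (cb :: b') + 1)
          (min (pvLevA (ca :: a') b' + 1) (pvLevA a' b' + (if ca = cb then 0 else 1))) from by
        simp [pvLevA, pvInd]]

theorem pvFoldr_row (b : List Char) (a : List Char) :
    a.foldr (fun ca row => pvNextRow ca b row) (pvBaseRow b) = pvRowOf a b := by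
  induction a with
  | nil => simpa using pvBaseRow_eq b
  | cons ca a' ih => simp [List.foldr, ih, pvNextRow_eq]

theorem pvLevB_eq (a b : List Char) : pvLevB a b = pvLevA a b := by
  unfold pvLevB
  rw [pvFoldr_row, pvRowOf_headD]

-- correspondence of the two selection folds, generalized over the remaining suffix
theorem pvSel (f : String → Int) (S : List String) :
    ∀ (ss : List String) (k : Nat) (idx cur : Int) (bs : String),
      S.drop k = ss →
      PySem.List.pyGet? S idx = some bs →
      (let rA := (PySem.List.enumerate (ss.map f) (k : Int)).foldl
          (fun (st : Int × Int) p => if p.2 < st.2 then (p.1, p.2) else st) (idx, cur);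
       let rB := ss.foldl
          (fun (best : String × Int) s =>
            let d := f s
            if d < best.2 then (s, d) else best) (bs, cur);
       ((PySem.List.pyGet? S rA.1).getD "", rA.2) = rB) := by
  intro ss
  induction ss with
  | nil =>
      intro k idx cur bs _ hidx
      simp [hidx]
  | cons s ss' ih =>
      intro k idx cur bs hdrop hidx
      have hk : S[k]? = some s := by
        have h0 : (S.drop k)[0]? = S[k + 0]? := List.getElem?_drop
        simp [hdrop] at h0
        simpa using h0.symm
      have hdrop' : S.drop (k + 1) = ss' := by
        have h1 : (S.drop k).drop 1 = S.drop (k + 1) := by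
          rw [List.drop_drop]
        rw [hdrop] at h1
        simpa using h1.symm
      simp only [List.map_cons, PySem.List.enumerate_cons, List.foldl_cons]
      by_cases hlt : f s < cur
      · simp only [hlt, if_pos]
        have hgs : PySem.List.pyGet? S (k : Int) = some s := by
          simpa [PySem.List.pyGet?_natCast] using hk
        have := ih (k + 1) (k : Int) (f s) s hdrop' hgs
        simpa [Int.natCast_add] using this
      · simp only [hlt, if_neg, not_false_iff]
        have := ih (k + 1) idx cur bs hdrop' hidx
        simpa [Int.natCast_add] using this

theorem pv_le_foldl_max (l : List Int) (a : Int) : a ≤ l.foldl max a := by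
  induction l generalizing a with
  | nil => simp
  | cons b l ih => exact le_trans (le_max_left a b) (ih (max a b))

-- ===== VERDICT (by name: the statement is the Claim_ definition above) =====
theorem shortest_levenshtein_spec : Claim_equal_shortest_levenshtein := by
  intro keyword strings _ hpre
  unfold Spec_shortest_levenshtein shortest_levenshtein shortest_levenshtein_alt
  cases strings with
  | nil => exact absurd rfl hpre
  | cons s0 rest =>
      simp only [pvLevB_eq]
      set f : String → Int := fun s => pvLevA keyword.toList s.toList with hf
      have hmax : PySem.List.max? ((s0 :: rest).map f) (fun d => d) =
          some ((rest.map f).foldl max (f s0)) := by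
        simpa using PySem.List.max?_id_cons (x := f s0) (t := rest.map f)
      have hle : f s0 ≤ (rest.map f).foldl max (f s0) := pv_le_foldl_max _ _
      set m := (rest.map f).foldl max (f s0) with hm
      simp only [List.map_cons] at hmax
      have hinit : (if f s0 < m then ((0 : Int), f s0) else ((0 : Int), m)) = (0, f s0) := by
        split_ifs with h
        · rfl
        · rw [le_antisymm hle (not_lt.mp h)]
      simp only [List.map_cons, hmax, PySem.List.enumerate_cons, List.foldl_cons]
      have hsel := pvSel f (s0 :: rest) rest 1 0 (f s0) s0 (by rfl)
        (PySem.List.pyGet?_zero_cons s0 rest)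
      simp only [] at hsel
      simpa [hinit] using hsel
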